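-- pv_equiv track=rewrite | github.com/jhaip/wysiwyog | programs/text_editor--1013.py | get_cursor_index_from_position
-- ===== SOURCE A (Python) =====
-- def get_cursor_index_from_position(string, position):
--     lines = string.split("\n")
--     OUT_OF_BOUNDS = None
--     if position[1] < 0 or position[1] > len(lines) - 1:
--         return OUT_OF_BOUNDS
--     if position[0] < 0 or position[0] > len(lines[position[1]]):
--         return OUT_OF_BOUNDS
--     index = 0
--     for i in range(position[1]):
--         index += len(lines[i]) + 1
--     index += position[0]
--     return index
-- ===== SOURCE B (Python) =====
-- def get_cursor_index_from_position(string, position):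
--     col, row = position
--     if row < 0:
--         return None
--     start = 0
--     for _ in range(row):
--         nl = string.find("\n", start)
--         if nl == -1:
--             return None
--         start = nl + 1
--     end = string.find("\n", start)
--     if end == -1:
--         end = len(string)
--     if col < 0 or col > end - start:
--         return None
--     return start + col
-- ===== Notes on version B (the rewrite author's own statement) =====
-- stated objective: alternative
-- what changed: Instead of splitting the string into a list of lines and summing their lengths, B walks the string in place with str.find('\n', start), skipping row newlines to locate the line start and one more find to locate the line end, so no line list is ever materialised.
import Mathlib
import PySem

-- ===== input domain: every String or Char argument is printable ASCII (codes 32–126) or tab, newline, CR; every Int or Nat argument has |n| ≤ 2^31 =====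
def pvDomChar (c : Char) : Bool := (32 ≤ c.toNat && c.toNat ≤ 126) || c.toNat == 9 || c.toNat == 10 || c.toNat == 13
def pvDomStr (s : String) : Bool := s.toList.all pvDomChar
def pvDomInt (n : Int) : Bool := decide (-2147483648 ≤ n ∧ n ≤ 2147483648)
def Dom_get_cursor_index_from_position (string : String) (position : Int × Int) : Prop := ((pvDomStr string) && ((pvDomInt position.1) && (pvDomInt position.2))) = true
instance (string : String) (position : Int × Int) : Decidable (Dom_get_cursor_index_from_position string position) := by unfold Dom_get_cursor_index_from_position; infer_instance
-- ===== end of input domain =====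

-- B replaces A's split-into-lines-and-sum approach by walking the string in place with find('\n', start); same O(n) cost, no line list.

-- ===== PORT A =====
def get_cursor_index_from_position (string : String) (position : Int × Int) : Option Int :=
  let lines := PySem.Chars.splitOn string.toList ['\n']
  if position.2 < 0 ∨ position.2 > (lines.length : Int) - 1 then none
  else if position.1 < 0 ∨ position.1 > ((PySem.List.pyGetD lines position.2 []).length : Int) then none
  else
    let index := (PySem.List.pyRange 0 position.2).foldl
      (fun acc i => acc + ((PySem.List.pyGetD lines i []).length : Int) + 1) (0 : Int)
    some (index + position.1)

-- ===== PORT B =====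
-- the for-loop of Source B: `row` times, start = string.find('\n', start) + 1, bailing out on -1
def altSkip (s : List Char) (start : Nat) : Nat → Option Nat
  | 0 => some start
  | n + 1 =>
      let nl := PySem.Chars.findFrom s ['\n'] (start : Int) none
      if nl = -1 then none else altSkip s (nl.toNat + 1) n

def get_cursor_index_from_position_alt (string : String) (position : Int × Int) : Option Int :=
  let col := position.1
  let row := position.2
  if row < 0 then none
  else
    match altSkip string.toList 0 row.toNat with
    | none => none
    | some start =>
        let e := PySem.Chars.findFrom string.toList ['\n'] (start : Int) none
        let e := if e = -1 then (string.toList.length : Int) else e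
        if col < 0 ∨ col > e - (start : Int) then none
        else some ((start : Int) + col)

-- ===== PRECONDITION & SPEC =====
def Spec_get_cursor_index_from_position (string : String) (position : Int × Int) (out : Option Int) : Prop := out = get_cursor_index_from_position_alt string position
instance (string : String) (position : Int × Int) (out : Option Int) : Decidable (Spec_get_cursor_index_from_position string position out) := by unfold Spec_get_cursor_index_from_position; infer_instance

-- ===== CLAIM (what is proved, stated in full; the proofs are below) =====
def Claim_equal_get_cursor_index_from_position : Prop := ∀ (string : String) (position : Int × Int), Dom_get_cursor_index_from_position string position → Spec_get_cursor_index_from_position string position (get_cursor_index_from_position string position)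

-- ===== LEMMAS AND PROOFS =====

-- the lines of a character list, as str.split("\n") produces them
def linesOf : List Char → List (List Char)
  | [] => [[]]
  | c :: r =>
      if c = '\n' then [] :: linesOf r
      else match linesOf r with
           | [] => [[c]]
           | l :: ls => (c :: l) :: ls

def mapHead (f : List Char → List Char) : List (List Char) → List (List Char)
  | [] => []
  | x :: xs => f x :: xs

theorem linesOf_ne_nil (t : List Char) : linesOf t ≠ [] := by
  cases t with
  | nil => simp [linesOf]
  | cons c r =>
      simp only [linesOf]
      split
      · simp
      · split <;> simp

theorem go_spec : ∀ (fuel : Nat) (l cur : List Char) (acc : List (List Char)),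
    l.length ≤ fuel →
    PySem.Chars.splitOn.go ['\n'] fuel l cur acc = acc.reverse ++ mapHead (cur.reverse ++ ·) (linesOf l) := by
  intro fuel
  induction fuel with
  | zero =>
      intro l cur acc hl
      have : l = [] := by
        cases l with
        | nil => rfl
        | cons a b => simp at hl
      subst this
      simp [PySem.Chars.splitOn.go, linesOf, mapHead]
  | succ fuel ih =>
      intro l cur acc hl
      cases l with
      | nil => simp [PySem.Chars.splitOn.go, linesOf, mapHead]
      | cons c rest =>
          by_cases hc : c = '\n'
          · subst hc
            have hpre : List.isPrefixOf ['\n'] ('\n' :: rest) = true := by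
              simp [List.isPrefixOf]
            rw [PySem.Chars.splitOn.go]
            simp only [hpre, if_pos]
            have hdd : List.drop ['\n'].length ('\n' :: rest) = rest := rfl
            rw [hdd]
            rw [ih rest [] (cur.reverse :: acc) (by simpa using Nat.lt_succ_iff.mp (by simpa using hl))]
            simp [linesOf, mapHead]
            cases h : linesOf rest with
            | nil => exact absurd h (linesOf_ne_nil rest)
            | cons x xs => simp [mapHead]
          · have hpre : List.isPrefixOf ['\n'] (c :: rest) = false := by
              simp [List.isPrefixOf]
              intro h; exact hc h.symm
            rw [PySem.Chars.splitOn.go]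
            simp only [hpre, Bool.false_eq_true, if_false]
            rw [ih rest (c :: cur) acc (by simpa using Nat.lt_succ_iff.mp (by simpa using hl))]
            simp only [linesOf, hc, ite_false]
            cases h : linesOf rest with
            | nil => exact absurd h (linesOf_ne_nil rest)
            | cons x xs => simp [mapHead]

theorem splitOn_eq_linesOf (t : List Char) : PySem.Chars.splitOn t ['\n'] = linesOf t := by
  unfold PySem.Chars.splitOn
  rw [go_spec (t.length + 1) t [] [] (by omega)]
  cases h : linesOf t with
  | nil => exact absurd h (linesOf_ne_nil t)
  | cons x xs => simp [mapHead]

theorem singleton_prefix_iff_head? (c : Char) (l : List Char) : [c] <+: l ↔ l.head? = some c := by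
  cases l with
  | nil => simp
  | cons a b => simp [List.cons_prefix_cons, eq_comm]

theorem linesOf_no_nl (t : List Char) (h : '\n' ∉ t) : linesOf t = [t] := by
  induction t with
  | nil => rfl
  | cons c r ih =>
      simp only [List.mem_cons, not_or] at h
      have hc : c ≠ '\n' := fun hh => h.1 hh.symm
      simp only [linesOf, hc, ite_false]
      rw [ih h.2]

theorem linesOf_first (t : List Char) (j : Nat) (hj : t[j]? = some '\n')
    (hmin : ∀ i < j, t[i]? ≠ some '\n') :
    linesOf t = t.take j :: linesOf (t.drop (j + 1)) := by
  induction t generalizing j with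
  | nil => simp at hj
  | cons c r ih =>
      cases j with
      | zero =>
          simp at hj
          subst hj
          simp [linesOf]
      | succ m =>
          have hc : c ≠ '\n' := by
            have := hmin 0 (Nat.succ_pos m)
            simpa using this
          have hj' : r[m]? = some '\n' := by simpa using hj
          have hmin' : ∀ i < m, r[i]? ≠ some '\n' := by
            intro i hi
            have := hmin (i + 1) (by omega)
            simpa using this
          simp only [linesOf, hc, ite_false]
          rw [ih m hj' hmin']
          simp

def sumLines (L : List (List Char)) (n : Nat) : Int :=
  ((List.range n).map (fun i => ((L.getD i []).length : Int) + 1)).sum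

theorem sumLines_zero (L : List (List Char)) : sumLines L 0 = 0 := by simp [sumLines]

theorem sumLines_cons_succ (x : List Char) (L : List (List Char)) (n : Nat) :
    sumLines (x :: L) (n + 1) = ((x.length : Int) + 1) + sumLines L n := by
  unfold sumLines
  rw [List.range_succ_eq_map]
  simp only [List.map_cons, List.map_map, Function.comp_def, List.getElem?_cons_succ,
    List.getElem?_cons_zero, List.sum_cons, List.getD, Option.getD_some]

-- the 'end' value Source B computes after the skip loop
def endOf (s : List Char) (k : Nat) : Int :=
  let e := PySem.Chars.findFrom s ['\n'] (k : Int) none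
  if e = -1 then (s.length : Int) else e

theorem first_nl_of_find (s : List Char) (h : ¬ PySem.Chars.find s ['\n'] = -1) :
    0 ≤ PySem.Chars.find s ['\n'] ∧
    s[(PySem.Chars.find s ['\n']).toNat]? = some '\n' ∧
    ∀ i < (PySem.Chars.find s ['\n']).toNat, s[i]? ≠ some '\n' := by
  have h0 : 0 ≤ PySem.Chars.find s ['\n'] := by
    have := PySem.Chars.neg_one_le_find s ['\n']
    omega
  obtain ⟨hpre, hminp⟩ := PySem.Chars.find_spec h0
  refine ⟨h0, ?_, ?_⟩
  · have := (singleton_prefix_iff_head? '\n' _).mp hpre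
    simpa [List.head?_drop] using this
  · intro i hi hcontra
    exact hminp i hi ((singleton_prefix_iff_head? '\n' _).mpr (by simpa [List.head?_drop] using hcontra))

theorem no_nl_of_find (s : List Char) (h : PySem.Chars.find s ['\n'] = -1) : '\n' ∉ s := by
  have := (PySem.Chars.find_eq_neg_one_iff s ['\n']).mp h
  intro hmem
  obtain ⟨l1, l2, rfl⟩ := List.append_of_mem hmem
  exact this ⟨l1, l2, by simp⟩

theorem endOf_eq (s : List Char) (k : Nat) (hk : k ≤ s.length) :
    endOf s k = (k : Int) + ((linesOf (s.drop k)).getD 0 []).length := by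
  unfold endOf
  rw [PySem.Chars.findFrom_natCast s ['\n'] k hk]
  by_cases hf : PySem.Chars.find (s.drop k) ['\n'] = -1
  · simp only [hf, if_pos]
    rw [linesOf_no_nl _ (no_nl_of_find _ hf)]
    simp
    omega
  · obtain ⟨h0, hj, hmin⟩ := first_nl_of_find _ hf
    set j := (PySem.Chars.find (s.drop k) ['\n']).toNat with hjdef
    have hlt : j < (s.drop k).length := by
      by_contra hcon
      rw [List.getElem?_eq_none (by omega)] at hj
      simp at hj
    have hval : PySem.Chars.find (s.drop k) ['\n'] = (j : Int) := by omega
    rw [linesOf_first _ j hj hmin]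
    simp only [if_neg hf]
    have hne2 : ¬ ((k : Int) + PySem.Chars.find (s.drop k) ['\n'] = -1) := by omega
    rw [if_neg hne2]
    simp only [List.getD, List.getElem?_cons_zero, Option.getD_some, List.length_take,
      List.length_drop]
    rw [hval]
    rw [List.length_drop] at hlt
    omega

theorem key (n : Nat) : ∀ (s : List Char) (start : Nat), start ≤ s.length →
    ( (linesOf (s.drop start)).length ≤ n → altSkip s start n = none ) ∧
    ( n < (linesOf (s.drop start)).length →
        ∃ k : Nat, altSkip s start n = some k ∧ start ≤ k ∧ k ≤ s.length ∧
          (k : Int) = (start : Int) + sumLines (linesOf (s.drop start)) n ∧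
          endOf s k = (k : Int) + ((linesOf (s.drop start)).getD n []).length ) := by
  induction n with
  | zero =>
      intro s start hstart
      constructor
      · intro hle
        exact absurd (List.length_eq_zero_iff.mp (Nat.le_zero.mp hle)) (linesOf_ne_nil _)
      · intro _
        refine ⟨start, rfl, le_refl _, hstart, by simp [sumLines_zero], ?_⟩
        exact endOf_eq s start hstart
  | succ n ih =>
      intro s start hstart
      have hff := PySem.Chars.findFrom_natCast s ['\n'] start hstart
      by_cases hf : PySem.Chars.find (s.drop start) ['\n'] = -1
      · -- no more newlines: exactly one line remains
        have hlines : linesOf (s.drop start) = [s.drop start] := linesOf_no_nl _ (no_nl_of_find _ hf)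
        have hskip : altSkip s start (n + 1) = none := by
          simp only [altSkip]
          rw [hff, if_pos (by rw [if_pos hf])]
        constructor
        · intro _; exact hskip
        · intro hlt
          rw [hlines] at hlt
          simp at hlt
      · obtain ⟨h0, hj, hmin⟩ := first_nl_of_find _ hf
        set j := (PySem.Chars.find (s.drop start) ['\n']).toNat with hjdef
        have hlt : j < (s.drop start).length := by
          by_contra hcon
          rw [List.getElem?_eq_none (by omega)] at hj
          simp at hj
        have hjlen : start + j + 1 ≤ s.length := by
          rw [List.length_drop] at hlt
          omega
        have hdrop : s.drop (start + j + 1) = (s.drop start).drop (j + 1) := by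
          rw [List.drop_drop]
          congr 1
        have hlines : linesOf (s.drop start) = (s.drop start).take j :: linesOf ((s.drop start).drop (j + 1)) :=
          linesOf_first _ j hj hmin
        have hval : PySem.Chars.find (s.drop start) ['\n'] = (j : Int) := by omega
        rw [if_neg hf] at hff
        have hne : ¬ PySem.Chars.findFrom s ['\n'] (start : Int) none = -1 := by
          rw [hff]; omega
        have htoNat : (PySem.Chars.findFrom s ['\n'] (start : Int) none).toNat = start + j := by
          rw [hff, hval]; omega
        have hskip : altSkip s start (n + 1) = altSkip s (start + j + 1) n := by
          simp only [altSkip]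
          rw [if_neg hne, htoNat]
        obtain ⟨ihnone, ihsome⟩ := ih s (start + j + 1) hjlen
        rw [hdrop] at ihnone ihsome
        have htakelen : ((s.drop start).take j).length = j := by simp; omega
        constructor
        · intro hle
          rw [hlines] at hle
          simp only [List.length_cons] at hle
          rw [hskip]
          exact ihnone (by omega)
        · intro hltn
          rw [hlines] at hltn
          simp only [List.length_cons] at hltn
          obtain ⟨k, hk1, hk2, hk3, hk4, hk5⟩ := ihsome (by omega)
          refine ⟨k, by rw [hskip]; exact hk1, by omega, hk3, ?_, ?_⟩
          · rw [hlines, sumLines_cons_succ, htakelen, hk4]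
            push_cast
            ring
          · rw [hlines]
            simpa using hk5

theorem foldl_body_eq (lines : List (List Char)) :
    (fun (acc : Int) (i : Int) => acc + ((PySem.List.pyGetD lines i []).length : Int) + 1)
      = fun acc i => acc + (((PySem.List.pyGetD lines i []).length : Int) + 1) := by
  funext acc i; ring

-- ===== VERDICT (by name: the statement is the Claim_ definition above) =====
theorem get_cursor_index_from_position_spec : Claim_equal_get_cursor_index_from_position := by
  intro string position _dom
  unfold Spec_get_cursor_index_from_position
  obtain ⟨c, r⟩ := position
  simp only [get_cursor_index_from_position, get_cursor_index_from_position_alt,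
    splitOn_eq_linesOf]
  by_cases hneg : r < 0
  · simp [hneg]
  · push_neg at hneg
    have hlen1 : linesOf string.toList ≠ [] := linesOf_ne_nil _
    have hlen1' : 0 < (linesOf string.toList).length := List.length_pos_iff.mpr hlen1
    have hkey := key r.toNat string.toList 0 (Nat.zero_le _)
    rw [List.drop_zero] at hkey
    obtain ⟨knone, ksome⟩ := hkey
    by_cases hb : r > ((linesOf string.toList).length : Int) - 1
    · rw [knone (by omega)]
      simp [hneg.not_gt, hb]
    · push_neg at hb
      obtain ⟨k, hk1, _, hk3, hk4, hk5⟩ := ksome (by omega)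
      rw [hk1]
      dsimp only
      have hA1 : ¬ (r < 0 ∨ r > ((linesOf string.toList).length : Int) - 1) := by
        push_neg
        exact ⟨hneg, hb⟩
      rw [if_neg hA1, if_neg hneg.not_gt]
      have he : (if PySem.Chars.findFrom string.toList ['\n'] ((k : Nat) : Int) none = -1
            then ((string.toList.length : Nat) : Int)
            else PySem.Chars.findFrom string.toList ['\n'] ((k : Nat) : Int) none)
          = (k : Int) + (((linesOf string.toList).getD r.toNat []).length : Int) := by
        rw [← hk5]
        rfl
      have hget : PySem.List.pyGetD (linesOf string.toList) r [] = (linesOf string.toList).getD r.toNat [] := by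
        rw [PySem.List.pyGetD_of_nonneg (linesOf string.toList) [] hneg]
      by_cases hcc : c < 0 ∨ c > (((linesOf string.toList).getD r.toNat []).length : Int)
      · rw [if_pos (by rw [hget]; exact hcc)]
        have hcc' : c < 0 ∨ c > (if PySem.Chars.findFrom string.toList ['\n'] ((k : Nat) : Int) none = -1
            then ((string.toList.length : Nat) : Int)
            else PySem.Chars.findFrom string.toList ['\n'] ((k : Nat) : Int) none) - (k : Int) := by
          rw [he]
          rcases hcc with h | h
          · exact Or.inl h
          · right; omega
        rw [if_pos hcc']
      · rw [if_neg (by rw [hget]; exact hcc)]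
        have hcc' : ¬ (c < 0 ∨ c > (if PySem.Chars.findFrom string.toList ['\n'] ((k : Nat) : Int) none = -1
            then ((string.toList.length : Nat) : Int)
            else PySem.Chars.findFrom string.toList ['\n'] ((k : Nat) : Int) none) - (k : Int)) := by
          rw [he]
          push_neg at hcc ⊢
          exact ⟨hcc.1, by omega⟩
        rw [if_neg hcc']
        congr 1
        -- foldl over pyRange equals k
        have hr : r = ((r.toNat : Nat) : Int) := by omega
        rw [hr, PySem.List.pyRange_zero_natCast, foldl_body_eq, List.foldl_map,
          PySem.List.foldl_add]
        have hmap : (List.map (fun (y : Nat) => ((PySem.List.pyGetD (linesOf string.toList) (y : Int) []).length : Int) + 1) (List.range r.toNat))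
            = List.map (fun (i : Nat) => (((linesOf string.toList).getD i []).length : Int) + 1) (List.range r.toNat) := by
          apply List.map_congr_left
          intro i _
          rw [PySem.List.pyGetD_of_nonneg (linesOf string.toList) [] (by positivity)]
          simp
        rw [hmap]
        have hsum : (k : Int) = sumLines (linesOf string.toList) r.toNat := by
          rw [hk4]
          simp
        unfold sumLines at hsum
        omega
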